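-- pv_equiv track=rewrite | github.com/shiqi-lu/roam2md | roam2md.py | inline_equation
-- ===== SOURCE A (Python) =====
-- def inline_equation(line):
--     """行内公式，把前后的$$换成$"""
--     if line.find("$$") == -1:
--         return line
--     split_list = line.split("$$")
--     # 只能匹配到奇数个$$
--     if len(split_list) % 2 == 0:
--         return line
--     for i, item in enumerate(split_list):
--         if i % 2 == 1 and item:
--             split_list[i] = "$" + item + "$"
--     return "".join(split_list)
-- ===== SOURCE B (Python) =====
-- def inline_equation(line):
--     """行内公式，把前后的$$换成$"""
--     if line.count("$$") % 2 == 1: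
--         return line
--     parts = []
--     rest = line
--     while True:
--         i = rest.find("$$")
--         if i == -1:
--             parts.append(rest)
--             break
--         j = rest.find("$$", i + 2)
--         parts.append(rest[:i])
--         inner = rest[i + 2:j]
--         if inner:
--             parts.append("$" + inner + "$")
--         rest = rest[j + 2:]
--     return "".join(parts)
-- ===== Notes on version B (the rewrite author's own statement) =====
-- stated objective: alternative
-- what changed: A splits the whole line on the double-dollar delimiter into a list, mutates the odd-indexed pieces in an enumerate loop and joins them back; B keeps a cursor and, after one parity pre-check with count, scans the line left to right, locating each delimiter pair with two find calls and emitting the rewritten pieces as it goes.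
import Mathlib
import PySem

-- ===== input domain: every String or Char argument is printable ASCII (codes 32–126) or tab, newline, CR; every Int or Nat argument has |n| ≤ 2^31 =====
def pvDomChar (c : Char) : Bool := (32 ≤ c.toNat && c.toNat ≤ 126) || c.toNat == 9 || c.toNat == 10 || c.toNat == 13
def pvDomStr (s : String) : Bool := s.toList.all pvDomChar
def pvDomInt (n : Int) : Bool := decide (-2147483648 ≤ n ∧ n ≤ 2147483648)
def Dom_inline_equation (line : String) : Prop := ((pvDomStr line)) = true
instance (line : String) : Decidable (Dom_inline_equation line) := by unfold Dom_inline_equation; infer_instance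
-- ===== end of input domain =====

-- B replaces A's split/enumerate/rewrap/join pipeline by a single cursor scan that locates each
-- "$$" pair with two find calls and emits the rewritten pieces as it goes ("alternative").

-- ===== PORT A =====
-- line.split("$$") with a non-empty literal separator never raises: PySem.Chars.splitOn is the exact sep ≠ "" form.
-- The for-loop writes back into split_list only at odd indices; the final "".join of the mutated
-- list is transcribed as the join of the enumerate-map with the same per-index expression.
def inline_equation (line : String) : String :=
  if PySem.Str.find line "$$" == -1 then line
  else
    let split_list := PySem.Chars.splitOn line.toList ['$', '$']
    if split_list.length % 2 == 0 then line
    else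
      String.ofList (PySem.Chars.join []
        ((PySem.List.enumerate split_list).map (fun p =>
          if PySem.Int.mod p.1 2 == 1 && !(p.2 == []) then '$' :: p.2 ++ ['$'] else p.2)))

-- ===== PORT B =====
-- the 'while True' loop of Source B: rest is the unprocessed suffix, parts the output pieces.
-- The Nat fuel only makes the recursion structural (callers pass length+1, more than the loop
-- can ever consume, since each iteration drops at least one character); it changes no value.
def pvBLoop : Nat → List Char → List (List Char) → List (List Char)
  | 0, _, parts => parts
  | fuel + 1, rest, parts =>
    let i := PySem.Chars.find rest ['$','$']
    if i == -1 then parts ++ [rest]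
    else
      let j := PySem.Chars.findFrom rest ['$','$'] (i + 2)
      let inner := PySem.List.slice rest (some (i + 2)) (some j)
      let parts1 := parts ++ [PySem.List.slice rest none (some i)]
      let parts2 := if inner == [] then parts1 else parts1 ++ ['$' :: inner ++ ['$']]
      pvBLoop fuel (PySem.List.slice rest (some (j + 2)) none) parts2

def inline_equation_alt (line : String) : String :=
  if PySem.Str.count line "$$" % 2 == 1 then line
  else String.ofList (PySem.Chars.join [] (pvBLoop (line.toList.length + 1) line.toList []))

-- ===== PRECONDITION & SPEC =====
def Spec_inline_equation (line : String) (out : String) : Prop := out = inline_equation_alt line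
instance (line : String) (out : String) : Decidable (Spec_inline_equation line out) := by unfold Spec_inline_equation; infer_instance

-- ===== CLAIM (what is proved, stated in full; the proofs are below) =====
def Claim_equal_inline_equation : Prop := ∀ (line : String), Dom_inline_equation line → Spec_inline_equation line (inline_equation line)

-- ===== LEMMAS AND PROOFS =====

theorem pvFind_nil_dd : PySem.Chars.find [] ['$','$'] = -1 := by decide

-- reference splitter: pvSplit l = l.split("$$") (proved equal to PySem.Chars.splitOn below)
def pvSplit (l : List Char) : List (List Char) :=
  if h : PySem.Chars.find l ['$','$'] = -1 then [l]
  else l.take (PySem.Chars.find l ['$','$']).toNat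
        :: pvSplit (l.drop ((PySem.Chars.find l ['$','$']).toNat + 2))
termination_by l.length
decreasing_by
  have hnn : 0 ≤ PySem.Chars.find l ['$','$'] := by
    have := PySem.Chars.neg_one_le_find l ['$','$']; omega
  have hlen := ((PySem.Chars.find_spec hnn).1).length_le
  have hne : l ≠ [] := fun hnil => h (hnil ▸ pvFind_nil_dd)
  have := List.length_pos_iff.mpr hne
  simp only [List.length_drop, List.length_cons, List.length_nil] at hlen
  simp only [List.length_drop]
  omega

-- the rewriting both programs perform on the pieces (wrap odd pieces, drop empty ones)
def pvWrap : List (List Char) → List (List Char)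
  | [] => []
  | [p] => [p]
  | p0 :: p1 :: rest =>
      p0 :: ((if p1 = [] then [] else [('$' :: p1 ++ ['$'])]) ++ pvWrap rest)

def pvConsHead (pre : List Char) : List (List Char) → List (List Char)
  | [] => [pre]
  | p :: ps => (pre ++ p) :: ps

theorem pvSplit_ne_nil (l : List Char) : pvSplit l ≠ [] := by
  rw [pvSplit.eq_def]; split <;> simp

theorem pvFind_zero_of_prefix (l : List Char) (h : ['$','$'] <+: l) :
    PySem.Chars.find l ['$','$'] = 0 := by
  have hnn : 0 ≤ PySem.Chars.find l ['$','$'] :=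
    (PySem.Chars.find_nonneg_iff l _).mpr h.isInfix
  have hs := (PySem.Chars.find_spec hnn).2
  by_contra hne
  exact hs 0 (by omega) (by simpa using h)

theorem pvFind_cons (c : Char) (l : List Char) (h : ¬ ['$','$'] <+: (c :: l)) :
    PySem.Chars.find (c :: l) ['$','$'] =
      if PySem.Chars.find l ['$','$'] = -1 then -1 else PySem.Chars.find l ['$','$'] + 1 := by
  split_ifs with h1
  · rw [PySem.Chars.find_eq_neg_one_iff] at h1 ⊢
    rw [List.infix_cons_iff]
    tauto
  · have hnn : 0 ≤ PySem.Chars.find l ['$','$'] := by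
      have := PySem.Chars.neg_one_le_find l ['$','$']; omega
    have hsl := PySem.Chars.find_spec hnn
    have hinf : ['$','$'] <:+: (c :: l) :=
      List.infix_cons_iff.mpr (Or.inr ((PySem.Chars.find_nonneg_iff l _).mp hnn))
    have hF : 0 ≤ PySem.Chars.find (c :: l) ['$','$'] :=
      (PySem.Chars.find_nonneg_iff _ _).mpr hinf
    have hsc := PySem.Chars.find_spec hF
    -- F ≠ 0
    have hF0 : (PySem.Chars.find (c :: l) ['$','$']).toNat ≠ 0 := by
      intro h0
      exact h (by simpa [h0] using hsc.1)
    -- lower bound: F.toNat ≥ i₂.toNat + 1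
    have hlow : ¬ (PySem.Chars.find (c :: l) ['$','$']).toNat - 1 < (PySem.Chars.find l ['$','$']).toNat := by
      intro hlt
      have hp : ['$','$'] <+: List.drop ((PySem.Chars.find (c :: l) ['$','$']).toNat - 1) l := by
        have := hsc.1
        rwa [show (PySem.Chars.find (c :: l) ['$','$']).toNat
            = ((PySem.Chars.find (c :: l) ['$','$']).toNat - 1) + 1 from by omega,
          List.drop_succ_cons] at this
      exact hsl.2 _ hlt hp
    -- upper bound: F.toNat ≤ i₂.toNat + 1
    have hup : ¬ (PySem.Chars.find l ['$','$']).toNat + 1 < (PySem.Chars.find (c :: l) ['$','$']).toNat := by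
      intro hlt
      exact hsc.2 _ hlt (by simpa [List.drop_succ_cons] using hsl.1)
    omega

theorem pvSplit_nil : pvSplit [] = [[]] := by
  rw [pvSplit.eq_def]; simp [pvFind_nil_dd]

theorem pvSplit_of_prefix (l : List Char) (h : ['$','$'].isPrefixOf l) :
    pvSplit l = [] :: pvSplit (l.drop 2) := by
  rw [pvSplit.eq_def]
  have h0 := pvFind_zero_of_prefix l (List.isPrefixOf_iff_prefix.mp h)
  simp [h0]

theorem pvSplit_of_found (l : List Char) (h : ¬ PySem.Chars.find l ['$','$'] = -1) :
    pvSplit l = l.take (PySem.Chars.find l ['$','$']).toNat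
      :: pvSplit (l.drop ((PySem.Chars.find l ['$','$']).toNat + 2)) := by
  rw [pvSplit.eq_def, dif_neg h]

theorem pvSplit_of_not_found (l : List Char) (h : PySem.Chars.find l ['$','$'] = -1) :
    pvSplit l = [l] := by
  rw [pvSplit.eq_def, dif_pos h]

theorem pvConsHead_nil_pre (xs : List (List Char)) (h : xs ≠ []) : pvConsHead [] xs = xs := by
  cases xs with
  | nil => exact absurd rfl h
  | cons p ps => simp [pvConsHead]

theorem pvConsHead_cons_not_prefix (c : Char) (l cur : List Char)
    (h : ¬ ['$','$'].isPrefixOf (c :: l)) :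
    pvConsHead (cur ++ [c]) (pvSplit l) = pvConsHead cur (pvSplit (c :: l)) := by
  rw [List.isPrefixOf_iff_prefix] at h
  by_cases h1 : PySem.Chars.find l ['$','$'] = -1
  · have hc : PySem.Chars.find (c :: l) ['$','$'] = -1 := by
      rw [pvFind_cons c l h]; simp [h1]
    rw [pvSplit_of_not_found l h1, pvSplit_of_not_found (c :: l) hc]
    simp [pvConsHead]
  · have hnn : 0 ≤ PySem.Chars.find l ['$','$'] := by
      have := PySem.Chars.neg_one_le_find l ['$','$']; omega
    have hc : PySem.Chars.find (c :: l) ['$','$'] = PySem.Chars.find l ['$','$'] + 1 := by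
      rw [pvFind_cons c l h]; simp [h1]
    rw [pvSplit_of_found l h1, pvSplit_of_found (c :: l) (by rw [hc]; omega)]
    rw [hc]
    have ht : (PySem.Chars.find l ['$','$'] + 1).toNat = (PySem.Chars.find l ['$','$']).toNat + 1 := by
      omega
    simp [pvConsHead, ht, List.take_succ_cons, List.drop_succ_cons]

theorem pvSplitOn_go_eq (fuel : Nat) :
    ∀ (l cur : List Char) (acc : List (List Char)), l.length < fuel →
      PySem.Chars.splitOn.go ['$','$'] fuel l cur acc =
        acc.reverse ++ pvConsHead cur.reverse (pvSplit l) := by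
  induction fuel with
  | zero => intro l cur acc h; omega
  | succ n ih =>
    intro l cur acc h
    match l with
    | [] =>
      rw [PySem.Chars.splitOn.go]
      · simp [pvSplit_nil, pvConsHead]
      · omega
    | c :: rest =>
      rw [PySem.Chars.splitOn.go]
      simp only [show (['$','$'] : List Char).length = 2 from rfl]
      by_cases hp : ['$','$'].isPrefixOf (c :: rest)
      · rw [if_pos hp]
        rw [ih _ _ _ (by simp at h ⊢; omega)]
        simp only [List.reverse_nil, List.reverse_cons, List.append_assoc, List.cons_append,
          List.nil_append]
        rw [pvConsHead_nil_pre _ (pvSplit_ne_nil _), pvSplit_of_prefix _ hp]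
        simp [pvConsHead]
      · rw [if_neg hp]
        rw [ih _ _ _ (by simp at h ⊢; omega)]
        rw [← pvConsHead_cons_not_prefix c rest cur.reverse hp]
        simp

theorem pvSplitOn_eq (l : List Char) : PySem.Chars.splitOn l ['$','$'] = pvSplit l := by
  rw [PySem.Chars.splitOn, pvSplitOn_go_eq (l.length + 1) l [] [] (by omega)]
  rcases hs : pvSplit l with _ | ⟨p, ps⟩
  · exact absurd hs (pvSplit_ne_nil l)
  · simp [pvConsHead]

theorem pvCount_go_eq (fuel : Nat) :
    ∀ (l : List Char) (acc : Nat), l.length ≤ fuel →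
      PySem.Chars.count.go ['$','$'] fuel l acc = acc + ((pvSplit l).length - 1) := by
  induction fuel with
  | zero =>
    intro l acc h
    have : l = [] := List.eq_nil_of_length_eq_zero (by omega)
    subst this
    rw [PySem.Chars.count.go]
    simp [pvSplit_nil]
  | succ n ih =>
    intro l acc h
    match l with
    | [] =>
      rw [PySem.Chars.count.go]
      · simp [pvSplit_nil]
      · omega
    | c :: rest =>
      rw [PySem.Chars.count.go]
      by_cases hp : ['$','$'].isPrefixOf (c :: rest)
      · rw [if_pos hp]
        simp only [show (['$','$'] : List Char).length = 2 from rfl]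
        rw [ih _ _ (by simp at h ⊢; omega)]
        rw [pvSplit_of_prefix _ hp]
        have := List.length_pos_iff.mpr (pvSplit_ne_nil (List.drop 2 (c :: rest)))
        simp only [List.length_cons]
        omega
      · rw [if_neg hp]
        rw [ih _ _ (by simp at h ⊢; omega)]
        have hlen : (pvSplit (c :: rest)).length = (pvSplit rest).length := by
          have hch := pvConsHead_cons_not_prefix c rest [] hp
          rcases h1 : pvSplit rest with _ | ⟨p, ps⟩
          · exact absurd h1 (pvSplit_ne_nil rest)
          · rcases h2 : pvSplit (c :: rest) with _ | ⟨q, qs⟩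
            · exact absurd h2 (pvSplit_ne_nil (c :: rest))
            · rw [h1, h2] at hch
              simp [pvConsHead] at hch
              simp [hch.2]
        omega

theorem pvCount_eq (l : List Char) :
    PySem.Chars.count l ['$','$'] = (pvSplit l).length - 1 := by
  rw [PySem.Chars.count]
  rw [if_neg (by simp)]
  have := pvCount_go_eq l.length l 0 (le_refl _)
  omega

theorem pvJoin_nil_eq_flatten (xs : List (List Char)) :
    PySem.Chars.join [] xs = xs.flatten := by
  rw [PySem.Chars.join, List.intercalate]
  induction xs with
  | nil => simp
  | cons a t ih =>
    cases t with
    | nil => simp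
    | cons b t' => simp_all [List.intersperse]

theorem pvFind_found_of_len (l : List Char) (h : 2 ≤ (pvSplit l).length) :
    ¬ PySem.Chars.find l ['$','$'] = -1 := by
  intro h1
  rw [pvSplit_of_not_found l h1] at h
  simp at h

-- B's loop computes pvWrap of the split
theorem pvBLoop_eq (n : Nat) :
    ∀ (l : List Char), l.length < n → (pvSplit l).length % 2 = 1 →
      ∀ parts, pvBLoop n l parts = parts ++ pvWrap (pvSplit l) := by
  induction n with
  | zero =>
    intro l hl _ parts
    omega
  | succ n ih =>
    intro l hl hodd parts
    rw [pvBLoop]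
    by_cases h1 : PySem.Chars.find l ['$','$'] = -1
    · simp only [h1, beq_self_eq_true, if_pos]
      rw [pvSplit_of_not_found l h1]
      simp [pvWrap]
    · simp only [beq_iff_eq, h1, if_false]
      have hnn : 0 ≤ PySem.Chars.find l ['$','$'] := by
        have := PySem.Chars.neg_one_le_find l ['$','$']; omega
      have hlen1 := ((PySem.Chars.find_spec hnn).1).length_le
      simp only [List.length_drop, List.length_cons, List.length_nil] at hlen1
      have hk : (PySem.Chars.find l ['$','$']).toNat + 2 ≤ l.length := by omega
      -- split once
      have hsplit := pvSplit_of_found l h1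
      -- the remainder also contains a pair: its split has even, hence ≥ 2, length
      have hrne := List.length_pos_iff.mpr
        (pvSplit_ne_nil (l.drop ((PySem.Chars.find l ['$','$']).toNat + 2)))
      have hlen2 : 2 ≤ (pvSplit (l.drop ((PySem.Chars.find l ['$','$']).toNat + 2))).length := by
        rw [hsplit] at hodd
        simp only [List.length_cons] at hodd
        omega
      have h2 := pvFind_found_of_len _ hlen2
      have hnn2 : 0 ≤ PySem.Chars.find (l.drop ((PySem.Chars.find l ['$','$']).toNat + 2)) ['$','$'] := by
        have := PySem.Chars.neg_one_le_find (l.drop ((PySem.Chars.find l ['$','$']).toNat + 2)) ['$','$']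
        omega
      -- j = i + 2 + i₂
      have hcast : PySem.Chars.find l ['$','$'] + 2
          = (((PySem.Chars.find l ['$','$']).toNat + 2 : Nat) : Int) := by omega
      rw [hcast, PySem.Chars.findFrom_natCast l ['$','$'] _ hk, if_neg h2]
      have hcast2 : (↑((PySem.Chars.find l ['$','$']).toNat + 2) : Int)
          + PySem.Chars.find (List.drop ((PySem.Chars.find l ['$','$']).toNat + 2) l) ['$','$']
          = ((((PySem.Chars.find l ['$','$']).toNat + 2)
              + (PySem.Chars.find (List.drop ((PySem.Chars.find l ['$','$']).toNat + 2) l) ['$','$']).toNat : Nat) : Int) := by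
        omega
      rw [hcast2, PySem.List.slice_natCast, PySem.List.slice_to l hnn]
      have hcast3 : (((((PySem.Chars.find l ['$','$']).toNat + 2)
              + (PySem.Chars.find (List.drop ((PySem.Chars.find l ['$','$']).toNat + 2) l) ['$','$']).toNat : Nat)) : Int) + 2
          = ((((PySem.Chars.find l ['$','$']).toNat + 2)
              + (PySem.Chars.find (List.drop ((PySem.Chars.find l ['$','$']).toNat + 2) l) ['$','$']).toNat + 2 : Nat) : Int) := by
        omega
      rw [hcast3, PySem.List.slice_from l (Int.natCast_nonneg _)]
      simp only [Int.toNat_natCast, Nat.add_sub_cancel_left]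
      set a := (PySem.Chars.find l ['$','$']).toNat with ha
      set r := List.drop (a + 2) l with hr
      set b := (PySem.Chars.find r ['$','$']).toNat with hb
      have hlen2' := ((PySem.Chars.find_spec hnn2).1).length_le
      simp only [List.length_drop, List.length_cons, List.length_nil] at hlen2'
      have hsplit2 := pvSplit_of_found _ h2
      rw [← hb] at hsplit2
      have hdd : List.drop (a + 2 + b + 2) l = List.drop (b + 2) r := by
        rw [hr, List.drop_drop]
        congr 1
      rw [hdd]
      have hlenr : (List.drop (b + 2) r).length < n := by
        simp only [List.length_drop, hr]
        omega
      have hparity : (pvSplit (List.drop (b + 2) r)).length % 2 = 1 := by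
        rw [hsplit, hsplit2] at hodd
        simp only [List.length_cons] at hodd
        omega
      rw [ih _ hlenr hparity]
      rw [hsplit, hsplit2]
      by_cases hin : List.take b r = []
      · simp [pvWrap, hin]
      · simp [pvWrap, hin]

-- A's enumerate-map rewrite flattens to the same characters as pvWrap
theorem pvEnumWrap (ps : List (List Char)) :
    ∀ k : Int, PySem.Int.mod k 2 = 0 →
      ((PySem.List.enumerate ps k).map (fun p =>
          if PySem.Int.mod p.1 2 == 1 && !(p.2 == []) then '$' :: p.2 ++ ['$'] else p.2)).flatten
        = (pvWrap ps).flatten := by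
  induction ps using pvWrap.induct with
  | case1 =>
    intro k hk
    simp [PySem.List.enumerate_nil, pvWrap]
  | case2 p =>
    intro k hk
    rw [PySem.Int.mod_eq_emod_of_pos (by norm_num)] at hk
    simp only [PySem.List.enumerate_cons, PySem.List.enumerate_nil, List.map_cons, List.map_nil,
      List.flatten_cons, List.flatten_nil, pvWrap]
    split_ifs with hc
    · simp only [Bool.and_eq_true, beq_iff_eq] at hc
      rw [PySem.Int.mod_eq_emod_of_pos (by norm_num)] at hc
      omega
    · simp
  | case3 p0 p1 rest ih =>
    intro k hk
    have hk1 : PySem.Int.mod (k + 1) 2 = 1 := by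
      rw [PySem.Int.mod_eq_emod_of_pos (by norm_num)] at hk ⊢
      omega
    have hk2 : PySem.Int.mod (k + 1 + 1) 2 = 0 := by
      rw [PySem.Int.mod_eq_emod_of_pos (by norm_num)] at hk ⊢
      omega
    simp only [PySem.List.enumerate_cons, List.map_cons, List.flatten_cons, hk, hk1]
    rw [ih _ hk2]
    by_cases hp1 : p1 = []
    · simp [pvWrap, hp1]
    · simp [pvWrap, hp1]

theorem pvDollars_toList : "$$".toList = ['$', '$'] := rfl

-- ===== VERDICT (by name: the statement is the Claim_ definition above) =====
theorem inline_equation_spec : Claim_equal_inline_equation := by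
  intro line _
  unfold Spec_inline_equation inline_equation inline_equation_alt
  simp only [PySem.Str.count, PySem.Str.find, pvDollars_toList, pvSplitOn_eq, pvCount_eq]
  by_cases h1 : PySem.Chars.find line.toList ['$','$'] = -1
  · -- no "$$" at all: both sides return line
    have hsp := pvSplit_of_not_found _ h1
    rw [if_pos (by simp [h1]), if_neg (by simp [hsp])]
    rw [pvBLoop_eq (line.toList.length + 1) _ (by omega) (by simp [hsp]) []]
    simp [hsp, pvWrap]
  · have hsp := pvSplit_of_found _ h1
    have hge2 : 2 ≤ (pvSplit line.toList).length := by
      have := List.length_pos_iff.mpr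
        (pvSplit_ne_nil (line.toList.drop ((PySem.Chars.find line.toList ['$','$']).toNat + 2)))
      rw [hsp]
      simp only [List.length_cons]
      omega
    rw [if_neg (by simp [h1])]
    by_cases h2 : (pvSplit line.toList).length % 2 = 0
    · -- odd number of "$$": both sides return line unchanged
      rw [if_pos (by simp [h2]), if_pos (by simp; omega)]
    · rw [if_neg (by simp [h2]), if_neg (by simp; omega)]
      rw [pvBLoop_eq (line.toList.length + 1) _ (by omega) (by omega) []]
      rw [pvJoin_nil_eq_flatten, pvJoin_nil_eq_flatten]
      rw [pvEnumWrap _ 0 (by decide)]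
      simp
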